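-- pv_equiv track=rewrite | github.com/kanavanand/digimall-route-integ | digimall-route-integ-main/utils.py | getPossibleSearches
-- ===== SOURCE A (Python) =====
-- def getPossibleSearches(text):
--     smallWord=[]
--     string=""
--     for char in text:
--         if char.isalpha():
--             string= string+char
--             if len(string)>2:
--                 smallWord.append(string)
--     return smallWord
-- ===== SOURCE B (Python) =====
-- def getPossibleSearches(text):
--     s = ''.join(c for c in text if c.isalpha())
--     return [s[:i] for i in range(3, len(s) + 1)]
-- ===== Notes on version B (the rewrite author's own statement) =====
-- stated objective: simpler
-- what changed: Replaces the incremental accumulate-and-append loop (growing prefix variable plus conditional append) with a two-phase structure: materialize the filtered alphabetic string once, then derive the output by slicing prefixes of lengths 3..len.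
import Mathlib
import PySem

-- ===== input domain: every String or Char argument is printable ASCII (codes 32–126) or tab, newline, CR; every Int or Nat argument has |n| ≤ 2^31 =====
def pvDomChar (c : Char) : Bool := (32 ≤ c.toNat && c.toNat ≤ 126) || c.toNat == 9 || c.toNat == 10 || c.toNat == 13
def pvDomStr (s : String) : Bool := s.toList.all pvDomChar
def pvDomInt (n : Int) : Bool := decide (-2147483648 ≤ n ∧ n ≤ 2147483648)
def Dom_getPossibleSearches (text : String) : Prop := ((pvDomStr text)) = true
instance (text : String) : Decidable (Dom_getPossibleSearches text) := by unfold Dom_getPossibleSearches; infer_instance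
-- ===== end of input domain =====

-- B replaces A's accumulate-and-append loop by filtering the alphabetic characters once
-- and slicing prefixes of lengths 3..len (objective: simpler decomposition, same cost).

-- ===== PORT A =====
-- loop body of A, lifted to a named helper
def pvStepA (st : List String × List Char) (c : Char) : List String × List Char :=
  if PySem.Chars.isalpha c then
    let s := st.2 ++ [c]
    if 2 < s.length then (st.1 ++ [String.ofList s], s) else (st.1, s)
  else st

def getPossibleSearches (text : String) : List String :=
  (text.toList.foldl pvStepA ([], [])).1

-- ===== PORT B =====
def getPossibleSearches_alt (text : String) : List String :=
  let s := text.toList.filter PySem.Chars.isalpha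
  (List.range' 3 (s.length + 1 - 3)).map (fun i => String.ofList (s.take i))

-- ===== PRECONDITION & SPEC =====
def Spec_getPossibleSearches (text : String) (out : List String) : Prop := out = getPossibleSearches_alt text
instance (text : String) (out : List String) : Decidable (Spec_getPossibleSearches text out) := by unfold Spec_getPossibleSearches; infer_instance

-- ===== CLAIM (what is proved, stated in full; the proofs are below) =====
def Claim_equal_getPossibleSearches : Prop := ∀ (text : String), Dom_getPossibleSearches text → Spec_getPossibleSearches text (getPossibleSearches text)

-- ===== LEMMAS AND PROOFS =====

/-- The list of strings appended by A's loop when the running prefix is `st`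
and the remaining input is the second argument. -/
def pvP (st : List Char) : List Char → List String
  | [] => []
  | c :: l =>
    if PySem.Chars.isalpha c then
      (if 2 < (st ++ [c]).length then [String.ofList (st ++ [c])] else []) ++ pvP (st ++ [c]) l
    else pvP st l

lemma pvFold_eq : ∀ (l : List Char) (sw : List String) (st : List Char),
    (l.foldl pvStepA (sw, st)) = (sw ++ pvP st l, st ++ l.filter PySem.Chars.isalpha) := by
  intro l
  induction l with
  | nil => intro sw st; simp [pvP]
  | cons c l ih =>
    intro sw st
    rw [List.foldl_cons]
    by_cases h : PySem.Chars.isalpha c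
    · by_cases h2 : 2 < (st ++ [c]).length
      · have hs : pvStepA (sw, st) c = (sw ++ [String.ofList (st ++ [c])], st ++ [c]) := by
          simp only [pvStepA]; rw [if_pos h, if_pos h2]
        rw [hs, ih]
        simp only [pvP]
        rw [if_pos h, if_pos h2]
        simp [h, List.append_assoc]
      · have hs : pvStepA (sw, st) c = (sw, st ++ [c]) := by
          simp only [pvStepA]; rw [if_pos h, if_neg h2]
        rw [hs, ih]
        simp only [pvP]
        rw [if_pos h, if_neg h2]
        simp [h, List.append_assoc]
    · have hs : pvStepA (sw, st) c = (sw, st) := by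
        simp only [pvStepA]; rw [if_neg h]
      rw [hs, ih]
      simp only [pvP]
      rw [if_neg h]
      simp [h]

lemma pvP_eq : ∀ (l st : List Char),
    pvP st l =
      ((List.range' (st.length + 1) (l.filter PySem.Chars.isalpha).length).filter
          (fun i => decide (2 < i))).map
        (fun i => String.ofList ((st ++ l.filter PySem.Chars.isalpha).take i)) := by
  intro l
  induction l with
  | nil => intro st; simp [pvP]
  | cons c l ih =>
    intro st
    by_cases h : PySem.Chars.isalpha c
    · have hfc : (c :: l).filter PySem.Chars.isalpha = c :: l.filter PySem.Chars.isalpha := by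
        simp [h]
      rw [hfc]
      simp only [pvP]
      rw [if_pos h, ih (st ++ [c])]
      have happ : st ++ c :: l.filter PySem.Chars.isalpha
          = (st ++ [c]) ++ l.filter PySem.Chars.isalpha := by simp
      simp only [happ]
      have hl : (st ++ [c]).length = st.length + 1 := by simp
      rw [hl]
      have hrange : List.range' (st.length + 1) ((l.filter PySem.Chars.isalpha).length + 1)
          = (st.length + 1) :: List.range' (st.length + 1 + 1) (l.filter PySem.Chars.isalpha).length := by
        rw [List.range'_succ]
      simp only [List.length_cons, hrange, List.filter_cons]
      have htake : ((st ++ [c]) ++ l.filter PySem.Chars.isalpha).take (st.length + 1) = st ++ [c] := by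
        rw [← hl, List.take_left]
      by_cases h2 : 2 < st.length + 1
      · rw [if_pos h2, if_pos (by simpa using h2), List.map_cons, htake]
        rfl
      · rw [if_neg h2, if_neg (by simpa using h2)]
        rfl
    · have hfc : (c :: l).filter PySem.Chars.isalpha = l.filter PySem.Chars.isalpha := by
        simp [h]
      rw [hfc]
      simp only [pvP]
      rw [if_neg h, ih st]

lemma pvFilter_range' : ∀ (n a : ℕ),
    (List.range' a n).filter (fun i => decide (2 < i)) = List.range' (max a 3) (n - (3 - a)) := by
  intro n
  induction n with
  | zero => intro a; simp
  | succ n ih =>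
    intro a
    rw [List.range'_succ, List.filter_cons]
    by_cases h : 2 < a
    · have h1 : max a 3 = a := by omega
      have h2 : 3 - a = 0 := by omega
      have h3 : max (a + 1) 3 = a + 1 := by omega
      have h4 : 3 - (a + 1) = 0 := by omega
      rw [if_pos (by simpa using h), ih (a + 1), h1, h2, h3, h4]
      simp only [Nat.sub_zero]
      rw [List.range'_succ]
    · have h1 : max a 3 = 3 := by omega
      have h3 : max (a + 1) 3 = 3 := by omega
      have h4 : n - (3 - (a + 1)) = (n + 1) - (3 - a) := by omega
      rw [if_neg (by simpa using h), ih (a + 1), h1, h3, h4]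

-- ===== VERDICT (by name: the statement is the Claim_ definition above) =====
theorem getPossibleSearches_spec : Claim_equal_getPossibleSearches := by
  intro text _
  show getPossibleSearches text = getPossibleSearches_alt text
  unfold getPossibleSearches getPossibleSearches_alt
  rw [pvFold_eq]
  simp only [pvP_eq, pvFilter_range', List.nil_append, List.length_nil, Nat.zero_add]
  have h1 : max 1 3 = 3 := by omega
  have h2 : ∀ m : ℕ, m - (3 - 1) = m + 1 - 3 := by omega
  rw [h1, h2]
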